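-- pv_equiv track=rewrite | github.com/CherryCocacola/nexus | core/orchestrator/context_manager.py | _compress_duplicate_lines
-- ===== SOURCE A (Python) =====
-- def _compress_duplicate_lines(content: str) -> str:
--     """
--     중복 라인을 압축한다.
--
--     같은 줄이 3번 이상 연속되면 "... (N번 반복)" 으로 교체한다.
--     로그 출력이나 반복되는 경고를 압축하는 데 효과적이다.
--     """
--     lines = content.split("\n")
--     if len(lines) < 3:
--         return content
--
--     result: list[str] = []
--     prev_line = ""
--     repeat_count = 0
--
--     for line in lines:
--         stripped = line.strip()
--         if stripped == prev_line and stripped: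
--             repeat_count += 1
--         else:
--             if repeat_count >= 2:
--                 result.append(f"... ({repeat_count + 1}번 반복)")
--             elif repeat_count == 1:
--                 result.append(prev_line)
--             prev_line = stripped
--             repeat_count = 0
--             result.append(line)
--
--     # 마지막 반복 처리
--     if repeat_count >= 2:
--         result.append(f"... ({repeat_count + 1}번 반복)")
--     elif repeat_count == 1:
--         result.append(prev_line)
--
--     return "\n".join(result)
-- ===== SOURCE B (Python) =====
-- def _compress_duplicate_lines(content: str) -> str:
--     lines = content.split("\n")
--     if len(lines) < 3:
--         return content
--     keys = [l.strip() for l in lines]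
--     n = len(lines)
--     # indices where a new segment begins: position 0, any whitespace-only line,
--     # any line whose stripped text differs from the previous one, and any line
--     # following a whitespace-only line (empty lines are never merged)
--     starts = [i for i in range(n)
--               if i == 0 or keys[i] == "" or keys[i] != keys[i - 1] or keys[i - 1] == ""]
--     bounds = starts + [n]
--     out: list[str] = []
--     for s, e in zip(bounds, bounds[1:]):
--         out.append(lines[s])
--         m = e - s
--         if m >= 3:
--             out.append(f"... ({m}번 반복)")
--         elif m == 2:
--             out.append(keys[s])
--     return "\n".join(out)
-- ===== Notes on version B (the rewrite author's own statement) =====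
-- stated objective: alternative
-- what changed: Replaces A's streaming prev_line/repeat_count state machine with end-of-loop flush by a two-phase index computation: first collect all segment-start indices with a local neighbour test, then render each segment from its (start, end) bounds pair.
import Mathlib
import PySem

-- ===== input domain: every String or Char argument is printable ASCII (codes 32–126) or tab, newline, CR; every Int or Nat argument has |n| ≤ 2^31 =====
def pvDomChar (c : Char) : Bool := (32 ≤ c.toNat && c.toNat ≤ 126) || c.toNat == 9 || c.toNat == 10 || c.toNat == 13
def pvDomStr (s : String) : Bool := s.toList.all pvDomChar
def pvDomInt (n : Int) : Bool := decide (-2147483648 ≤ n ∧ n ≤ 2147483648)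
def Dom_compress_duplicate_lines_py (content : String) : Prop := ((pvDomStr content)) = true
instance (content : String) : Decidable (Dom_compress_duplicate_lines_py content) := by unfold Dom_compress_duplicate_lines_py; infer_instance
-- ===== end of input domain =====

-- B replaces A's streaming prev_line/repeat_count state machine (with an end-of-loop flush) by a
-- two-phase boundary computation: it first finds all segment-start indices, then renders each
-- segment from its bounds (objective: alternative).

-- ===== PORT A =====
-- loop body of A: state = (result, prev_line, repeat_count)
def pvStepA (st : List String × String × Nat) (line : String) : List String × String × Nat :=
  let stripped := PySem.Str.strip line
  if stripped == st.2.1 && !(stripped == "") then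
    (st.1, st.2.1, st.2.2 + 1)
  else
    let r1 :=
      if 2 ≤ st.2.2 then st.1 ++ ["... (" ++ PySem.Int.toStr ((st.2.2 : Int) + 1) ++ "번 반복)"]
      else if st.2.2 == 1 then st.1 ++ [st.2.1]
      else st.1
    (r1 ++ [line], stripped, 0)

def compress_duplicate_lines_py (content : String) : String :=
  let lines := (PySem.Str.split? content "\n").getD [content]  -- sep ≠ "", so split? is `some`
  if lines.length < 3 then content
  else
    let st := lines.foldl pvStepA ([], "", 0)
    -- 마지막 반복 처리
    let r :=
      if 2 ≤ st.2.2 then st.1 ++ ["... (" ++ PySem.Int.toStr ((st.2.2 : Int) + 1) ++ "번 반복)"]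
      else if st.2.2 == 1 then st.1 ++ [st.2.1]
      else st.1
    PySem.Str.join "\n" r

-- ===== PORT B =====
-- Source B's segment-start condition (indices are all in range, so plain getD is Python's keys[i])
def pvStartFlag (keys : List String) (i : Nat) : Bool :=
  i == 0 || keys.getD i "" == "" || !(keys.getD i "" == keys.getD (i - 1) "") || keys.getD (i - 1) "" == ""

-- body of Source B's rendering loop over one (s, e) bounds pair
def pvEmitSeg (lines keys : List String) (p : Nat × Nat) : List String :=
  let m := p.2 - p.1
  lines.getD p.1 "" ::
    (if 3 ≤ m then ["... (" ++ PySem.Int.toStr (m : Int) ++ "번 반복)"]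
     else if m == 2 then [keys.getD p.1 ""]
     else [])

def compress_duplicate_lines_py_alt (content : String) : String :=
  let lines := (PySem.Str.split? content "\n").getD [content]  -- sep ≠ "", so split? is `some`
  if lines.length < 3 then content
  else
    let keys := lines.map PySem.Str.strip
    let n := lines.length
    let starts := (List.range n).filter (pvStartFlag keys)
    let bounds := starts ++ [n]
    PySem.Str.join "\n"
      ((bounds.zip (bounds.drop 1)).foldl (fun res p => res ++ pvEmitSeg lines keys p) [])

-- ===== PRECONDITION & SPEC =====
def Spec_compress_duplicate_lines_py (content : String) (out : String) : Prop := out = compress_duplicate_lines_py_alt content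
instance (content : String) (out : String) : Decidable (Spec_compress_duplicate_lines_py content out) := by unfold Spec_compress_duplicate_lines_py; infer_instance

-- ===== CLAIM (what is proved, stated in full; the proofs are below) =====
def Claim_equal_compress_duplicate_lines_py : Prop := ∀ (content : String), Dom_compress_duplicate_lines_py content → Spec_compress_duplicate_lines_py content (compress_duplicate_lines_py content)

-- ===== LEMMAS AND PROOFS =====

-- the common run decomposition both programs compute: whitespace-only lines are singleton
-- segments; otherwise a maximal run of lines with the same stripped text
def pvRuns : List String → List (List String)
  | [] => []
  | l :: ls =>
    if PySem.Str.strip l == "" then [l] :: pvRuns ls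
    else (l :: ls.takeWhile (fun x => PySem.Str.strip x == PySem.Str.strip l)) ::
         pvRuns (ls.dropWhile (fun x => PySem.Str.strip x == PySem.Str.strip l))
termination_by l => l.length
decreasing_by
  · simp
  · exact Nat.lt_succ_of_le (List.length_dropWhile_le _ _)

-- what one run contributes to the output
def pvEmitGroup (g : List String) : List String :=
  match g with
  | [] => []
  | l :: _ =>
    let key := PySem.Str.strip l
    if key == "" then g
    else
      let n := g.length
      if 3 ≤ n then [l, "... (" ++ PySem.Int.toStr (n : Int) ++ "번 반복)"]
      else if n == 2 then [l, key]
      else [l]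

-- what A's flush block (if repeat_count >= 2 / elif == 1) appends, as a list
def pvFlush (c : Nat) (p : String) : List String :=
  if 2 ≤ c then ["... (" ++ PySem.Int.toStr ((c : Int) + 1) ++ "번 반복)"]
  else if c = 1 then [p]
  else []

-- B's core computation on an arbitrary line list
def pvBCore (L : List String) : List String :=
  (((List.range L.length).filter (pvStartFlag (L.map PySem.Str.strip)) ++ [L.length]).zip
      (((List.range L.length).filter (pvStartFlag (L.map PySem.Str.strip)) ++ [L.length]).drop 1)).flatMap
    (pvEmitSeg L (L.map PySem.Str.strip))

lemma pvFinal_eq (r : List String) (p : String) (c : Nat) :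
    (if 2 ≤ c then r ++ ["... (" ++ PySem.Int.toStr ((c : Int) + 1) ++ "번 반복)"]
     else if c == 1 then r ++ [p]
     else r) = r ++ pvFlush c p := by
  simp only [pvFlush]
  split_ifs <;> simp_all

lemma pvDropWhile_head {α : Type} (p : α → Bool) (l : List α) (x : α) (xs' : List α)
    (h : List.dropWhile p l = x :: xs') : p x = false := by
  induction l with
  | nil => simp at h
  | cons a as ih =>
    by_cases hp : p a = true
    · rw [List.dropWhile_cons_of_pos hp] at h; exact ih h
    · rw [List.dropWhile_cons_of_neg hp] at h
      cases h; simpa using hp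

lemma pvStepA_incr (r : List String) (p line : String) (c : Nat)
    (h1 : PySem.Str.strip line = p) (h2 : p ≠ "") :
    pvStepA (r, p, c) line = (r, p, c + 1) := by
  simp [pvStepA, h1, h2]

lemma pvStepA_break (r : List String) (p line : String) (c : Nat)
    (h : PySem.Str.strip line = "" ∨ PySem.Str.strip line ≠ p) :
    pvStepA (r, p, c) line = (r ++ pvFlush c p ++ [line], PySem.Str.strip line, 0) := by
  have hcond : (PySem.Str.strip line == p && !(PySem.Str.strip line == "")) = false := by
    rcases h with h | h
    · simp [h]
    · simp [h]
  simp only [pvStepA, hcond, Bool.false_eq_true, if_false]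
  rw [pvFinal_eq]

-- a run of lines whose stripped text equals the (nonempty) current prev just counts up
lemma pvRun_nonempty (run : List String) (r : List String) (s : String) (c : Nat)
    (hs : s ≠ "") (hall : ∀ x ∈ run, PySem.Str.strip x = s) :
    run.foldl pvStepA (r, s, c) = (r, s, c + run.length) := by
  induction run generalizing c with
  | nil => simp
  | cons a as ih =>
    rw [List.foldl_cons, pvStepA_incr r s a c (hall a (by simp)) hs,
      ih (c + 1) (fun x hx => hall x (List.mem_cons_of_mem _ hx))]
    simp; omega

-- A-side invariant: finishing A's loop from state (r, p, c) (where the next line breaks the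
-- current run) produces r, the pending flush, then the per-run output of pvRuns
lemma pvMain (lines : List String) :
    ∀ (r : List String) (p : String) (c : Nat),
      (∀ l, lines.head? = some l → PySem.Str.strip l = "" ∨ PySem.Str.strip l ≠ p) →
      (lines.foldl pvStepA (r, p, c)).1
          ++ pvFlush (lines.foldl pvStepA (r, p, c)).2.2 (lines.foldl pvStepA (r, p, c)).2.1
        = r ++ pvFlush c p ++ (pvRuns lines).flatMap pvEmitGroup := by
  induction lines using pvRuns.induct with
  | case1 => intro r p c _; simp [pvRuns]
  | case2 l ls hse ih =>
    intro r p c hh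
    have hse' : PySem.Str.strip l = "" := by simpa using hse
    rw [List.foldl_cons, pvStepA_break r p l c (Or.inl hse'), hse']
    rw [ih (r ++ pvFlush c p ++ [l]) "" 0
      (fun l' _ => by
        by_cases h : PySem.Str.strip l' = ""
        · exact Or.inl h
        · exact Or.inr h)]
    rw [pvRuns, if_pos hse]
    simp [pvEmitGroup, hse', pvFlush]
  | case3 l ls hse ih =>
    intro r p c hh
    have hsne : PySem.Str.strip l ≠ "" := by simpa using hse
    have hbreak := hh l rfl
    have hgr : pvRuns (l :: ls)
        = (l :: ls.takeWhile (fun x => PySem.Str.strip x == PySem.Str.strip l))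
          :: pvRuns (ls.dropWhile (fun x => PySem.Str.strip x == PySem.Str.strip l)) := by
      rw [pvRuns, if_neg hse]
    set run := ls.takeWhile (fun x => PySem.Str.strip x == PySem.Str.strip l) with hrun
    set rest := ls.dropWhile (fun x => PySem.Str.strip x == PySem.Str.strip l) with hrest
    have hallrun : ∀ x ∈ run, PySem.Str.strip x = PySem.Str.strip l := by
      intro x hx
      have := List.mem_takeWhile_imp (hrun ▸ hx)
      simpa using this
    have hsplit : run ++ rest = ls := by
      rw [hrun, hrest]; exact List.takeWhile_append_dropWhile
    have hresth : ∀ l', rest.head? = some l'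
        → PySem.Str.strip l' = "" ∨ PySem.Str.strip l' ≠ PySem.Str.strip l := by
      intro l' hl'
      cases hr : rest with
      | nil => rw [hr] at hl'; simp at hl'
      | cons x xs =>
        rw [hr] at hl'
        have hx : x = l' := by simpa using hl'
        subst hx
        have hpx := pvDropWhile_head _ ls x xs (hrest ▸ hr)
        right; simpa using hpx
    rw [hgr, ← hsplit, List.foldl_cons, pvStepA_break r p l c hbreak, List.foldl_append]
    rw [pvRun_nonempty run _ (PySem.Str.strip l) 0 hsne hallrun]
    simp only [Nat.zero_add]
    rw [ih (r ++ pvFlush c p ++ [l]) (PySem.Str.strip l) run.length hresth]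
    have hemit : pvEmitGroup (l :: run) = l :: pvFlush run.length (PySem.Str.strip l) := by
      simp only [pvEmitGroup]
      rw [if_neg (by simpa using hse)]
      simp only [List.length_cons, pvFlush]
      split_ifs <;> first
        | rfl
        | omega
        | simp_all
    simp [hemit]

-- a lookup past the first block of an append reads the second block (keys are mapped strips)
lemma pvGetD_shift (u v : List String) (j : Nat) :
    ((u ++ v).map PySem.Str.strip).getD (u.length + j) "" = (v.map PySem.Str.strip).getD j "" := by
  rw [List.map_append, List.getD_append_right _ _ _ _ (by simp)]
  simp

-- first components of consecutive-bounds pairs are the start indices (all but the final bound)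
lemma pvZipFst {α : Type} : ∀ (xs : List α) (t : α) (p : α × α),
    p ∈ (xs ++ [t]).zip ((xs ++ [t]).drop 1) → p.1 ∈ xs := by
  intro xs
  induction xs with
  | nil => intro t p h; simp at h
  | cons a xs' ih =>
    intro t p h
    cases xs' with
    | nil =>
      simp only [List.cons_append, List.nil_append, List.drop_succ_cons, List.drop_zero,
        List.zip_cons_cons, List.zip_nil_right, List.mem_singleton] at h
      simp [h]
    | cons b xs'' =>
      simp only [List.cons_append, List.drop_succ_cons, List.drop_zero, List.zip_cons_cons,
        List.mem_cons] at h
      rcases h with h | h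
      · simp [h]
      · have := ih t p (by simpa using h)
        exact List.mem_cons_of_mem _ this

-- the central decomposition: if positions 1..|u|-1 are not starts, |u| is a start (when v ≠ []),
-- and the flag beyond |u| agrees with v's own flag, then B's computation splits off u's segment
lemma pvCoreAppend (u v : List String)
    (hu : u ≠ [])
    (ha : ∀ i, 1 ≤ i → i < u.length → pvStartFlag ((u ++ v).map PySem.Str.strip) i = false)
    (hc1 : v ≠ [] → pvStartFlag ((u ++ v).map PySem.Str.strip) u.length = true)
    (hc2 : ∀ j, 1 ≤ j → j < v.length →
        pvStartFlag ((u ++ v).map PySem.Str.strip) (u.length + j)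
          = pvStartFlag (v.map PySem.Str.strip) j) :
    pvBCore (u ++ v) =
      pvEmitSeg (u ++ v) ((u ++ v).map PySem.Str.strip) (0, u.length) ++ pvBCore v := by
  have hflag0 : pvStartFlag ((u ++ v).map PySem.Str.strip) 0 = true := by simp [pvStartFlag]
  have hfilter_u : (List.range u.length).filter (pvStartFlag ((u ++ v).map PySem.Str.strip)) = [0] := by
    obtain ⟨a', ha'⟩ : ∃ a', u.length = a' + 1 :=
      ⟨u.length - 1, by have := List.length_pos_iff.mpr hu; omega⟩
    rw [ha', List.range_succ_eq_map, List.filter_cons_of_pos hflag0, List.filter_map]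
    have hnil : (List.range a').filter (pvStartFlag ((u ++ v).map PySem.Str.strip) ∘ Nat.succ) = [] := by
      rw [List.filter_eq_nil_iff]
      intro i hi
      have hi' : i < a' := List.mem_range.mp hi
      simp only [Function.comp_apply, Nat.succ_eq_add_one]
      rw [ha (i + 1) (by omega) (by omega)]
      simp
    rw [hnil]
    simp
  have hfilter_v : (List.range v.length).filter
        (pvStartFlag ((u ++ v).map PySem.Str.strip) ∘ (fun x => u.length + x))
      = (List.range v.length).filter (pvStartFlag (v.map PySem.Str.strip)) := by
    apply List.filter_congr
    intro j hj
    have hj' : j < v.length := List.mem_range.mp hj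
    simp only [Function.comp_apply]
    rcases Nat.eq_zero_or_pos j with rfl | hj1
    · have hv : v ≠ [] := by intro h; subst h; simp at hj'
      rw [Nat.add_zero, hc1 hv]
      simp [pvStartFlag]
    · exact hc2 j hj1 hj'
  have hstarts : (List.range (u ++ v).length).filter (pvStartFlag ((u ++ v).map PySem.Str.strip))
      = 0 :: ((List.range v.length).filter (pvStartFlag (v.map PySem.Str.strip))).map
          (fun x => u.length + x) := by
    rw [List.length_append, List.range_add, List.filter_append, hfilter_u, List.filter_map,
      hfilter_v]
    rfl
  obtain ⟨tl, htl⟩ : ∃ tl,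
      (List.range v.length).filter (pvStartFlag (v.map PySem.Str.strip)) ++ [v.length]
        = 0 :: tl := by
    cases v with
    | nil => exact ⟨[], by simp⟩
    | cons x xs =>
      have h0 : pvStartFlag ((x :: xs).map PySem.Str.strip) 0 = true := by simp [pvStartFlag]
      rw [show (x :: xs).length = xs.length + 1 from rfl, List.range_succ_eq_map,
        List.filter_cons_of_pos h0]
      exact ⟨_, rfl⟩
  unfold pvBCore
  rw [hstarts, htl]
  have hbL : (0 :: ((List.range v.length).filter (pvStartFlag (v.map PySem.Str.strip))).map
        (fun x => u.length + x)) ++ [(u ++ v).length]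
      = 0 :: u.length :: tl.map (fun x => u.length + x) := by
    rw [List.cons_append, List.length_append]
    congr 1
    rw [show ([(u.length + v.length)] : List Nat)
        = (([v.length] : List Nat)).map (fun x => u.length + x) from rfl, ← List.map_append, htl]
    simp
  rw [hbL]
  -- peel off the first pair (0, u.length) and shift the remaining pairs down by u.length
  have hzip : (0 :: u.length :: tl.map (fun x => u.length + x)).zip
        ((0 :: u.length :: tl.map (fun x => u.length + x)).drop 1)
      = (0, u.length) :: ((0 :: tl).zip tl).map
          (Prod.map (fun x => u.length + x) (fun x => u.length + x)) := by
    simp only [List.drop_succ_cons, List.drop_zero, List.zip_cons_cons]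
    congr 1
    rw [show (u.length :: tl.map (fun x => u.length + x))
        = (0 :: tl).map (fun x => u.length + x) from by simp, List.zip_map]
  rw [hzip, List.flatMap_cons, List.flatMap_map]
  congr 1
  have hP : (0 :: tl).zip tl
      = ((List.range v.length).filter (pvStartFlag (v.map PySem.Str.strip)) ++ [v.length]).zip
          (((List.range v.length).filter (pvStartFlag (v.map PySem.Str.strip)) ++ [v.length]).drop 1) := by
    rw [htl]
    simp
  simp only [List.drop_succ_cons, List.drop_zero]
  rw [hP]
  apply List.flatMap_congr
  intro p hp
  have hp1 : p.1 ∈ (List.range v.length).filter (pvStartFlag (v.map PySem.Str.strip)) :=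
    pvZipFst _ _ p hp
  have hp1' : p.1 < v.length := List.mem_range.mp (List.mem_filter.mp hp1).1
  simp only [pvEmitSeg, Prod.map]
  have hm : u.length + p.2 - (u.length + p.1) = p.2 - p.1 := by omega
  have hl : (u ++ v).getD (u.length + p.1) "" = v.getD p.1 "" := by
    rw [List.getD_append_right _ _ _ _ (by omega)]
    simp
  rw [hm, hl, pvGetD_shift]

-- B-side: the boundary computation emits exactly the per-run output
lemma pvBCore_eq (L : List String) : pvBCore L = (pvRuns L).flatMap pvEmitGroup := by
  induction L using pvRuns.induct with
  | case1 => simp [pvBCore, pvRuns]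
  | case2 l ls hse ih =>
    have hse' : PySem.Str.strip l = "" := by simpa using hse
    have hstep := pvCoreAppend [l] ls (by simp)
      (by intro i h1 h2; simp at h2; omega)
      (by
        intro _
        simp [pvStartFlag, hse'])
      (by
        intro j hj1 hjlen
        obtain ⟨j', rfl⟩ : ∃ j', j = j' + 1 := ⟨j - 1, by omega⟩
        simp only [pvStartFlag, List.singleton_append, List.map_cons, List.length_cons,
          List.length_nil, Nat.zero_add]
        rw [show (1 : Nat) + (j' + 1) = (j' + 1) + 1 from by omega]
        simp only [List.getD_cons_succ, Nat.add_sub_cancel]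
        have h1 : ((j' + 1) + 1 == 0) = false := by simp
        have h2 : ((j' + 1 : Nat) == 0) = false := by simp
        rw [h1, h2])
    have hemit : pvEmitSeg ([l] ++ ls) (([l] ++ ls).map PySem.Str.strip) (0, [l].length) = [l] := by
      simp [pvEmitSeg]
    have hrw : pvRuns (l :: ls) = [l] :: pvRuns ls := by rw [pvRuns, if_pos hse]
    calc pvBCore (l :: ls)
        = pvEmitSeg ([l] ++ ls) (([l] ++ ls).map PySem.Str.strip) (0, [l].length) ++ pvBCore ls :=
          hstep
      _ = [l] ++ List.flatMap pvEmitGroup (pvRuns ls) := by rw [hemit, ih]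
      _ = List.flatMap pvEmitGroup (pvRuns (l :: ls)) := by
          rw [hrw, List.flatMap_cons]
          simp [pvEmitGroup, hse']
  | case3 l ls hse ih =>
    have hsne : PySem.Str.strip l ≠ "" := by simpa using hse
    set tw := ls.takeWhile (fun x => PySem.Str.strip x == PySem.Str.strip l) with htw
    set rest := ls.dropWhile (fun x => PySem.Str.strip x == PySem.Str.strip l) with hrest
    have hsplit : (l :: tw) ++ rest = l :: ls := by
      rw [htw, hrest]
      simp [List.takeWhile_append_dropWhile]
    have hmem : ∀ x ∈ (l :: tw), PySem.Str.strip x = PySem.Str.strip l := by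
      intro x hx
      rcases List.mem_cons.mp hx with rfl | hx
      · rfl
      · have := List.mem_takeWhile_imp (htw ▸ hx)
        simpa using this
    have hkey : ∀ i, i < (l :: tw).length →
        (((l :: tw) ++ rest).map PySem.Str.strip).getD i "" = PySem.Str.strip l := by
      intro i hi
      have hlen : i < (((l :: tw) ++ rest).map PySem.Str.strip).length := by
        simp only [List.length_map, List.length_append]
        omega
      rw [List.getD_eq_getElem _ _ hlen, List.getElem_map, List.getElem_append_left hi]
      exact hmem _ (List.getElem_mem hi)
    have hstep := pvCoreAppend (l :: tw) rest (by simp)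
      (by
        intro i h1 h2
        simp only [pvStartFlag]
        rw [hkey i h2, hkey (i - 1) (by omega)]
        have hi0 : (i == 0) = false := by simp; omega
        simp [hi0, hsne])
      (by
        intro hv
        cases hr : rest with
        | nil => exact absurd hr hv
        | cons x xs =>
          have hpx := pvDropWhile_head _ ls x xs (hrest ▸ hr)
          have hxne : PySem.Str.strip x ≠ PySem.Str.strip l := by simpa using hpx
          have hsh : (((l :: tw) ++ rest).map PySem.Str.strip).getD ((l :: tw).length) ""
              = PySem.Str.strip x := by
            have := pvGetD_shift (l :: tw) rest 0
            rw [Nat.add_zero] at this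
            rw [this, hr]
            simp
          have hprev : (((l :: tw) ++ rest).map PySem.Str.strip).getD ((l :: tw).length - 1) ""
              = PySem.Str.strip l := hkey _ (by simp)
          simp only [pvStartFlag]
          rw [← hr, hsh, hprev]
          simp [hxne])
      (by
        intro j hj1 hjlen
        obtain ⟨j', rfl⟩ : ∃ j', j = j' + 1 := ⟨j - 1, by omega⟩
        simp only [pvStartFlag]
        rw [pvGetD_shift, show (l :: tw).length + (j' + 1) - 1 = (l :: tw).length + j' from by omega,
          pvGetD_shift, show (j' + 1) - 1 = j' from by omega]
        have h1 : ((l :: tw).length + (j' + 1) == 0) = false := by simp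
        have h2 : ((j' + 1 : Nat) == 0) = false := by simp
        rw [h1, h2])
    have hemit : pvEmitSeg ((l :: tw) ++ rest) (((l :: tw) ++ rest).map PySem.Str.strip)
        (0, (l :: tw).length) = pvEmitGroup (l :: tw) := by
      simp [pvEmitSeg, pvEmitGroup, hsne]
      split_ifs <;> rfl
    have hrw : pvRuns (l :: ls) = (l :: tw) :: pvRuns rest := by
      rw [pvRuns, if_neg hse]
    calc pvBCore (l :: ls) = pvBCore ((l :: tw) ++ rest) := by rw [hsplit]
      _ = pvEmitSeg ((l :: tw) ++ rest) (((l :: tw) ++ rest).map PySem.Str.strip)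
            (0, (l :: tw).length) ++ pvBCore rest := hstep
      _ = pvEmitGroup (l :: tw) ++ List.flatMap pvEmitGroup (pvRuns rest) := by rw [hemit, ih]
      _ = List.flatMap pvEmitGroup (pvRuns (l :: ls)) := by rw [hrw, List.flatMap_cons]

-- ===== VERDICT (by name: the statement is the Claim_ definition above) =====
theorem compress_duplicate_lines_py_spec : Claim_equal_compress_duplicate_lines_py := by
  intro content _
  unfold Spec_compress_duplicate_lines_py compress_duplicate_lines_py compress_duplicate_lines_py_alt
  simp only
  by_cases hlen : ((PySem.Str.split? content "\n").getD [content]).length < 3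
  · rw [if_pos hlen, if_pos hlen]
  · rw [if_neg hlen, if_neg hlen]
    congr 1
    rw [PySem.List.foldl_append_eq_flatMap (pvEmitSeg _ _) _ []]
    have hb := pvBCore_eq ((PySem.Str.split? content "\n").getD [content])
    unfold pvBCore at hb
    rw [pvFinal_eq]
    have hmain := pvMain ((PySem.Str.split? content "\n").getD [content]) [] "" 0
      (fun l _ => by
        by_cases h : PySem.Str.strip l = ""
        · exact Or.inl h
        · exact Or.inr h)
    rw [hmain, ← hb]
    rfl
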